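-- pv_equiv track=rewrite | github.com/inthesunset/Pyramid_word | app.py | is_pyramid
-- ===== SOURCE A (Python) =====
-- from collections import defaultdict
--
-- def is_pyramid(word):
--     #time complexity: O(n)
--     if not word:
--         # empty word
--         return False
--     word2counts = defaultdict(int)
--     for char in word:
--         word2counts[char] += 1
--     countset = set(word2counts.values())
--     if len(countset) != len(word2counts):
--         # have duplicates
--         return False
--     if sum(countset) != len(countset) * (len(countset) + 1) // 2:
--         # sum == n*(n+1)//2
--         return False
--     else:
--         return True
-- ===== SOURCE B (Python) =====
-- def is_pyramid(word):
--     if not word: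
--         return False
--     counts = {}
--     for char in word:
--         counts[char] = counts.get(char, 0) + 1
--     vals = sorted(counts.values())
--     return vals == list(range(1, len(vals) + 1))
-- ===== Notes on version B (the rewrite author's own statement) =====
-- stated objective: simpler
-- what changed: replaces the set-dedup length check plus the n*(n+1)//2 triangular-sum identity by sorting the counts and comparing them directly to list(range(1, k+1))
import Mathlib
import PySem

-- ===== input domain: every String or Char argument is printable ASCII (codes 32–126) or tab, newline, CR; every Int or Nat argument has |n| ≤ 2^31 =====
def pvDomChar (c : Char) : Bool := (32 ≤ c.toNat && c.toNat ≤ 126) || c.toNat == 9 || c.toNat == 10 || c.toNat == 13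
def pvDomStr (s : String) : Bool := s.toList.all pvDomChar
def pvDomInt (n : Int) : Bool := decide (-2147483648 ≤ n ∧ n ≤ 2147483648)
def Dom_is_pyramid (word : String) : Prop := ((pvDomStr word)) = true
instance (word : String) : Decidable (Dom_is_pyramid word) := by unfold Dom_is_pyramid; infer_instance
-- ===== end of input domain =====

-- B replaces A's set-dedup length test plus the n*(n+1)//2 triangular-sum identity by
-- sorting the counts and comparing them to list(range(1, k+1)); objective: simpler.

-- ===== PORT A =====
def is_pyramid (word : String) : Bool :=
  if word.toList = [] then false
  else
    let word2counts : PySem.Dict Char Int :=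
      word.toList.foldl (fun d char => d.modify char 0 (· + 1)) PySem.Dict.empty
    let countset : PySem.Set Int := PySem.Set.ofList word2counts.values
    if countset.length ≠ word2counts.size then false
    else if countset.sum ≠ PySem.Int.floordiv ((countset.length : Int) * ((countset.length : Int) + 1)) 2 then false
    else true

-- ===== PORT B =====
def is_pyramid_alt (word : String) : Bool :=
  if word.toList = [] then false
  else
    let counts : PySem.Dict Char Int :=
      word.toList.foldl (fun d char => d.insert char (d.getD char 0 + 1)) PySem.Dict.empty
    let vals := PySem.List.sorted counts.values (fun x => x) false
    vals == PySem.List.pyRange 1 ((vals.length : Int) + 1) 1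

-- ===== PRECONDITION & SPEC =====
def Spec_is_pyramid (word : String) (out : Bool) : Prop := out = is_pyramid_alt word
instance (word : String) (out : Bool) : Decidable (Spec_is_pyramid word out) := by unfold Spec_is_pyramid; infer_instance

-- ===== CLAIM (what is proved, stated in full; the proofs are below) =====
def Claim_equal_is_pyramid : Prop := ∀ (word : String), Dom_is_pyramid word → Spec_is_pyramid word (is_pyramid word)

-- ===== LEMMAS AND PROOFS =====

-- set(xs) having as many elements as xs means xs has no duplicates
lemma nodup_of_length_ofList {α : Type} [BEq α] [LawfulBEq α] (xs : List α)
    (h : (PySem.Set.ofList xs).length = xs.length) : xs.Nodup := by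
  induction xs using List.reverseRecOn with
  | nil => exact List.nodup_nil
  | append_singleton t x ih =>
    rw [PySem.Set.ofList_append_singleton] at h
    by_cases hx : x ∈ PySem.Set.ofList t
    · rw [PySem.Set.add_of_mem hx] at h
      have := PySem.Set.length_ofList_le t
      simp at h; omega
    · rw [PySem.Set.add_of_not_mem hx] at h
      simp at h
      have ht := ih h
      have hxt : x ∉ t := fun hm => hx ((PySem.Set.mem_ofList t x).2 hm)
      simp [List.nodup_append, ht]
      exact fun a ha he => hxt (he ▸ ha)

-- a strictly increasing list of ints all ≥ a sums to at least sum(range(a, a + len))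
lemma sum_pyRange_le (s : List Int) (a : Int) (hp : s.Pairwise (· < ·))
    (hge : ∀ x ∈ s, a ≤ x) :
    (PySem.List.pyRange a (a + s.length) 1).sum ≤ s.sum := by
  induction s generalizing a with
  | nil => simp [PySem.List.pyRange_one_eq_nil]
  | cons x t ih =>
    have hcons : PySem.List.pyRange a (a + (x :: t).length) 1
        = a :: PySem.List.pyRange (a + 1) (a + (x :: t).length) 1 :=
      PySem.List.pyRange_one_cons (by simp)
    rw [hcons]
    have hb : a + (x :: t).length = (a + 1) + t.length := by simp; omega
    rw [hb]
    have hax : a ≤ x := hge x (by simp)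
    have hget : ∀ y ∈ t, a + 1 ≤ y := by
      intro y hy
      have := (List.pairwise_cons.1 hp).1 y hy
      omega
    have := ih (a + 1) (List.pairwise_cons.1 hp).2 hget
    simp only [List.sum_cons]
    omega

-- … and if the sum EQUALS sum(range(a, a + len)) the list IS that range
lemma eq_pyRange_of_sum (s : List Int) (a : Int) (hp : s.Pairwise (· < ·))
    (hge : ∀ x ∈ s, a ≤ x)
    (hsum : s.sum = (PySem.List.pyRange a (a + s.length) 1).sum) :
    s = PySem.List.pyRange a (a + s.length) 1 := by
  induction s generalizing a with
  | nil => simp [PySem.List.pyRange_one_eq_nil]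
  | cons x t ih =>
    have hcons : PySem.List.pyRange a (a + (x :: t).length) 1
        = a :: PySem.List.pyRange (a + 1) (a + (x :: t).length) 1 :=
      PySem.List.pyRange_one_cons (by simp)
    have hb : a + (x :: t).length = (a + 1) + t.length := by simp; omega
    have hax : a ≤ x := hge x (by simp)
    have hget : ∀ y ∈ t, a + 1 ≤ y := by
      intro y hy
      have := (List.pairwise_cons.1 hp).1 y hy
      omega
    have hle := sum_pyRange_le t (a + 1) (List.pairwise_cons.1 hp).2 hget
    rw [hcons, hb] at hsum
    simp only [List.sum_cons] at hsum
    have hxa : x = a := by omega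
    have hts : t.sum = (PySem.List.pyRange (a + 1) ((a + 1) + t.length) 1).sum := by omega
    have := ih (a + 1) (List.pairwise_cons.1 hp).2 hget hts
    rw [hcons, hb, hxa, ← this]

lemma sum_pyRange_tri (n : Nat) :
    2 * (PySem.List.pyRange 1 ((n : Int) + 1) 1).sum = (n : Int) * ((n : Int) + 1) := by
  induction n with
  | zero => simp [PySem.List.pyRange_one_eq_nil]
  | succ m ih =>
    have : ((m + 1 : Nat) : Int) + 1 = ((m : Int) + 1) + 1 := by push_cast; ring
    rw [this, PySem.List.pyRange_one_succ_right (by omega)]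
    simp only [List.sum_append, List.sum_cons, List.sum_nil]
    push_cast
    push_cast at ih
    ring_nf
    ring_nf at ih
    omega

-- A's n*(n+1)//2 is the sum of range(1, n+1)
lemma tri_floordiv (n : Nat) :
    PySem.Int.floordiv ((n : Int) * ((n : Int) + 1)) 2 = (PySem.List.pyRange 1 ((n : Int) + 1) 1).sum := by
  rw [PySem.Int.floordiv_eq_ediv_of_pos (by omega)]
  have := sum_pyRange_tri n
  omega

-- the heart: for a list of positive counts, A's set/triangular test ↔ B's sorted-range test
lemma cond_iff (vs : List Int) (hpos : ∀ x ∈ vs, 1 ≤ x) :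
    ((PySem.Set.ofList vs).length = vs.length ∧
      (PySem.Set.ofList vs).sum =
        PySem.Int.floordiv (((PySem.Set.ofList vs).length : Int) * (((PySem.Set.ofList vs).length : Int) + 1)) 2)
    ↔ PySem.List.sorted vs (fun x => x) false = PySem.List.pyRange 1 ((vs.length : Int) + 1) 1 := by
  set s := PySem.List.sorted vs (fun x => x) false with hs
  have hperm : s.Perm vs := PySem.List.sorted_perm vs (fun x => x) false
  have hlen : s.length = vs.length := hperm.length_eq
  have hsum : s.sum = vs.sum := hperm.sum_eq
  constructor
  · rintro ⟨h1, h2⟩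
    have hnd : vs.Nodup := nodup_of_length_ofList vs h1
    have hofl : PySem.Set.ofList vs = vs := PySem.Set.ofList_eq_self_of_nodup vs hnd
    rw [hofl] at h2
    rw [tri_floordiv vs.length] at h2
    have hnds : s.Nodup := hperm.nodup_iff.mpr hnd
    have hple : s.Pairwise (fun a b => (fun x => x) a ≤ (fun x => x) b) :=
      PySem.List.sorted_pairwise vs (fun x => x)
    have hplt : s.Pairwise (· < ·) :=
      (hple.and hnds).imp (fun h => lt_of_le_of_ne h.1 h.2)
    have hge : ∀ x ∈ s, (1 : Int) ≤ x := fun x hx => hpos x (hperm.mem_iff.1 hx)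
    have hb : (1 : Int) + s.length = (vs.length : Int) + 1 := by rw [hlen]; omega
    have := eq_pyRange_of_sum s 1 hplt hge (by rw [hb, hsum]; exact h2)
    rw [hb] at this
    exact this
  · intro h
    have hperm2 : (PySem.List.pyRange 1 ((vs.length : Int) + 1) 1).Perm vs := h ▸ hperm
    have hnd : vs.Nodup := hperm2.nodup (PySem.List.nodup_pyRange_one 1 _)
    have hofl : PySem.Set.ofList vs = vs := PySem.Set.ofList_eq_self_of_nodup vs hnd
    refine ⟨by rw [hofl], ?_⟩
    rw [hofl, tri_floordiv vs.length, ← hperm2.sum_eq]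

-- ===== VERDICT (by name: the statement is the Claim_ definition above) =====
theorem is_pyramid_spec : Claim_equal_is_pyramid := by
  intro word _
  unfold Spec_is_pyramid is_pyramid is_pyramid_alt
  by_cases hw : word.toList = []
  · simp [hw]
  · simp only [hw, if_false]
    set cs := word.toList with hcs
    set vs := (PySem.Dict.counter cs).values with hvs
    have hvals : vs = (PySem.Set.ofList cs).map (fun k => ((cs.count k : Nat) : Int)) := by
      rw [hvs]
      show ((PySem.Dict.counter cs).items.map (·.2)) = _
      rw [PySem.Dict.items_counter]
      simp [List.map_map, Function.comp]
    have hpos : ∀ x ∈ vs, (1 : Int) ≤ x := by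
      intro x hx
      rw [hvals] at hx
      simp only [List.mem_map] at hx
      obtain ⟨k, hk, rfl⟩ := hx
      have : k ∈ cs := (PySem.Set.mem_ofList cs k).1 hk
      have : 0 < cs.count k := List.count_pos_iff.2 this
      omega
    have hsize : (PySem.Dict.counter cs).size = vs.length := by
      simp [PySem.Dict.size, PySem.Dict.values, hvs]
    have key := cond_iff vs hpos
    have hsortlen : (PySem.List.sorted vs (fun x => x) false).length = vs.length :=
      (PySem.List.sorted_perm vs (fun x => x) false).length_eq
    show (if (PySem.Set.ofList vs).length ≠ (PySem.Dict.counter cs).size then false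
          else if (PySem.Set.ofList vs).sum ≠
              PySem.Int.floordiv (((PySem.Set.ofList vs).length : Int) * (((PySem.Set.ofList vs).length : Int) + 1)) 2 then false
          else true)
        = ((PySem.List.sorted vs (fun x => x) false)
            == PySem.List.pyRange 1 ((((PySem.List.sorted vs (fun x => x) false).length : Int) + 1)) 1)
    rw [hsize, hsortlen]
    split_ifs with h1 h2
    · have hnp : ¬ (PySem.List.sorted vs (fun x => x) false = PySem.List.pyRange 1 ((vs.length : Int) + 1) 1) :=
        fun hp => h1 (key.mpr hp).1
      exact (beq_eq_false_iff_ne.mpr hnp).symm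
    · push Not at h1
      have hnp : ¬ (PySem.List.sorted vs (fun x => x) false = PySem.List.pyRange 1 ((vs.length : Int) + 1) 1) :=
        fun hp => h2 (key.mpr hp).2
      exact (beq_eq_false_iff_ne.mpr hnp).symm
    · push Not at h1 h2
      exact (beq_iff_eq.mpr (key.mp ⟨h1, h2⟩)).symm
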